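-- pv_equiv track=rewrite | github.com/Jsena121/Python-Practice | coinFlipStreaks.py | streakFinder
-- ===== SOURCE A (Python) =====
-- def streakFinder(coinFlipResults):
--     currentStreak = 0
--     totalStreaks = 0
--     for result in range(len(coinFlipResults)):
--         #if coinFlipResults[result]==coinFlipResults[result+1]==coinFlipResults[result+2]==\
--          #  coinFlipResults[result+3]==coinFlipResults[result+4]==coinFlipResults[result+5] \
--           # ==coinFlipResults[result+6]:   long way
--         if result == 0:
--             pass
--         elif coinFlipResults[result] == coinFlipResults[result-1]:
--             currentStreak +=1
--         else:
--             currentStreak = 0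
--         if currentStreak == 6: #added variable currentStreak stops only counts a streakFinder
--                                 #once it hits 6. The other methods added an entire streak when
--                                 #one streak extended beyond 6.
--             totalStreaks +=1
--     return totalStreaks
-- ===== SOURCE B (Python) =====
-- def streakFinder(coinFlipResults):
--     # two-pointer run scan: split the list into maximal runs of equal
--     # consecutive elements and count the runs of length >= 7
--     total = 0
--     i = 0
--     n = len(coinFlipResults)
--     while i < n:
--         j = i + 1
--         while j < n and coinFlipResults[j] == coinFlipResults[i]:
--             j += 1
--         if j - i >= 7:
--             total += 1
--         i = j
--     return total
-- ===== Notes on version B (the rewrite author's own statement) =====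
-- stated objective: alternative
-- what changed: Replaces the per-index incremental streak counter (compare each element to its predecessor, bump on exactly 6) by a two-pointer run scan that splits the list into maximal runs of equal elements and counts runs of length >= 7.
import Mathlib
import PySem

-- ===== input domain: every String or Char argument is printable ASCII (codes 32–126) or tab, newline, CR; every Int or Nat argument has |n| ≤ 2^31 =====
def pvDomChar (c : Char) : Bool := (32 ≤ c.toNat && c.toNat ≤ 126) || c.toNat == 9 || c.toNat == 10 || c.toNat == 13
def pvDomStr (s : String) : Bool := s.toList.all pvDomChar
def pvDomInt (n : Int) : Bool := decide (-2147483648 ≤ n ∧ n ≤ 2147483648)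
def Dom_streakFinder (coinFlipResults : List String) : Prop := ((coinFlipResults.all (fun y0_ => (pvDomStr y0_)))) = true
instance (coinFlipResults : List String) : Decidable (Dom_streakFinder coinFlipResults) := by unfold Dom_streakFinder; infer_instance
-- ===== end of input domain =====

-- B replaces A's per-index incremental streak counter by a two-pointer maximal-run scan
-- counting runs of length ≥ 7 (alternative decomposition, same O(n) cost); return values proved equal.


-- ===== PORT A =====
-- loop body of A: state (currentStreak, totalStreaks), index `result`
def aStep (xs : List String) (s : Int × Int) (result : Int) : Int × Int :=
  let cur : Int :=
    if result == 0 then s.1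
    else if (PySem.List.pyGet? xs result).getD "" == (PySem.List.pyGet? xs (result - 1)).getD "" then s.1 + 1
    else 0
  let tot : Int := if cur == 6 then s.2 + 1 else s.2
  (cur, tot)

def streakFinder (coinFlipResults : List String) : Int :=
  ((PySem.List.pyRange 0 (coinFlipResults.length : Int) 1).foldl (aStep coinFlipResults) (0, 0)).2

-- ===== PORT B =====
-- inner while loop of B: consume the maximal leading run equal to v, return (its length, rest)
def bRun (v : String) : List String → Nat × List String
  | [] => (0, [])
  | x :: xs => if x == v then let p := bRun v xs; (p.1 + 1, p.2) else (0, x :: xs)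

lemma bRun_rest_le (v : String) (xs : List String) : (bRun v xs).2.length ≤ xs.length := by
  induction xs with
  | nil => simp [bRun]
  | cons x xs ih =>
    simp only [bRun]
    split
    · exact Nat.le_succ_of_le ih
    · simp

-- outer while loop of B: one recursive step per maximal run
def bLoop : List String → Int
  | [] => 0
  | x :: xs =>
    let p := bRun x xs
    (if 7 ≤ p.1 + 1 then (1 : Int) else 0) + bLoop p.2
termination_by xs => xs.length
decreasing_by
  exact Nat.lt_succ_of_le (bRun_rest_le x xs)

def streakFinder_alt (coinFlipResults : List String) : Int :=
  bLoop coinFlipResults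

-- ===== PRECONDITION & SPEC =====
def Spec_streakFinder (coinFlipResults : List String) (out : Int) : Prop := out = streakFinder_alt coinFlipResults
instance (coinFlipResults : List String) (out : Int) : Decidable (Spec_streakFinder coinFlipResults out) := by unfold Spec_streakFinder; infer_instance

-- ===== CLAIM (what is proved, stated in full; the proofs are below) =====
def Claim_equal_streakFinder : Prop := ∀ (coinFlipResults : List String), Dom_streakFinder coinFlipResults → Spec_streakFinder coinFlipResults (streakFinder coinFlipResults)

-- ===== LEMMAS AND PROOFS =====

-- structural reformulation of A's loop: prev = previous element, walk the tail
def aLoop : String → List String → Int → Int → Int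
  | _, [], _, tot => tot
  | prev, x :: xs, cur, tot =>
    let cur' : Int := if x == prev then cur + 1 else 0
    let tot' : Int := if cur' == 6 then tot + 1 else tot
    aLoop x xs cur' tot'

-- A's index fold from index i (1 ≤ i ≤ n) equals aLoop on the dropped suffix
lemma bridge : ∀ (k : ℕ) (xs : List String) (i : ℕ) (s : Int × Int),
    i + k = xs.length → 1 ≤ i →
    ((PySem.List.pyRange (i : Int) (xs.length : Int) 1).foldl (aStep xs) s).2
      = aLoop ((PySem.List.pyGet? xs ((i : Int) - 1)).getD "") (xs.drop i) s.1 s.2 := by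
  intro k
  induction k with
  | zero =>
    intro xs i s h _
    have : (i : Int) = (xs.length : Int) := by omega
    rw [this, PySem.List.pyRange_one_eq_nil le_rfl]
    have hd : xs.drop i = [] := by
      apply List.drop_eq_nil_of_le; omega
    simp [hd, aLoop]
  | succ k ih =>
    intro xs i s h hi
    have hilt : i < xs.length := by omega
    rw [PySem.List.pyRange_one_cons (by exact_mod_cast hilt)]
    simp only [List.foldl_cons]
    have hcast : ((i : Int) + 1) = ((i + 1 : ℕ) : Int) := by push_cast; ring
    rw [hcast, ih xs (i + 1) _ (by omega) (by omega)]
    -- identify both sides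
    have hget : ∀ (j : ℕ) (hj : j < xs.length), (PySem.List.pyGet? xs (j : Int)).getD "" = xs[j] := by
      intro j hj
      simp [PySem.List.pyGet?_natCast, List.getElem?_eq_getElem hj]
    have hdrop : xs.drop i = xs[i] :: xs.drop (i + 1) :=
      List.drop_eq_getElem_cons hilt
    have h1 : ((i + 1 : ℕ) : Int) - 1 = (i : Int) := by push_cast; ring
    rw [h1, hdrop]
    have hi0 : ¬ ((i : Int) == 0) = true := by
      simp only [beq_iff_eq]; omega
    simp only [aStep, aLoop, hi0, Bool.false_eq_true, if_false]
    rw [hget i hilt]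

-- within one maximal run, A's counter crosses 6 at most once
lemma aLoop_run : ∀ (xs : List String) (v : String) (i : ℕ) (tot : Int),
    aLoop v xs (i : Int) tot =
      (match (bRun v xs).2 with
       | [] => tot + (if i < 6 ∧ 6 ≤ i + (bRun v xs).1 then (1 : Int) else 0)
       | x :: rest' => aLoop x rest' 0 (tot + (if i < 6 ∧ 6 ≤ i + (bRun v xs).1 then (1 : Int) else 0))) := by
  intro xs
  induction xs with
  | nil =>
    intro v i tot
    simp only [aLoop, bRun]
    rw [if_neg (by omega : ¬ (i < 6 ∧ 6 ≤ i + 0)), add_zero]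
  | cons x xs ih =>
    intro v i tot
    by_cases hxv : x == v
    · have hx : x = v := by simpa using hxv
      subst hx
      have hbr : bRun x (x :: xs) = ((bRun x xs).1 + 1, (bRun x xs).2) := by
        simp [bRun]
      have hc : ((i : Int) + 1) = ((i + 1 : ℕ) : Int) := by push_cast; ring
      have key : (if (((i : Int) + 1) == 6) = true then tot + 1 else tot)
          + (if i + 1 < 6 ∧ 6 ≤ i + 1 + (bRun x xs).1 then (1:Int) else 0)
          = tot + (if i < 6 ∧ 6 ≤ i + ((bRun x xs).1 + 1) then (1:Int) else 0) := by
        have h6 : ((((i : Int) + 1) == 6) = true) ↔ i + 1 = 6 := by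
          simp only [beq_iff_eq]; omega
        by_cases h : i + 1 = 6
        · rw [if_pos (h6.mpr h), if_neg (by omega), if_pos (by omega)]; ring
        · rw [if_neg (fun hh => h (h6.mp hh))]
          by_cases hb : i + 1 < 6 ∧ 6 ≤ i + 1 + (bRun x xs).1
          · rw [if_pos hb, if_pos (by omega)]
          · rw [if_neg hb, if_neg (by omega)]
      simp only [aLoop, beq_self_eq_true, if_pos, hbr]
      rw [hc, ih x (i+1)]
      cases hrest : (bRun x xs).2 with
      | nil => rw [← hc, key]
      | cons y ys => rw [← hc, key]
    · have hbr : bRun v (x :: xs) = (0, x :: xs) := by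
        simp [bRun, hxv]
      have h06 : (((0:Int) == 6) = true) = False := by simp
      have hnot : ¬ (i < 6 ∧ 6 ≤ i + 0) := by omega
      simp only [aLoop, hxv, Bool.false_eq_true, if_false, hbr, h06, add_zero]
      rw [if_neg (by omega : ¬(i < 6 ∧ 6 ≤ i)), add_zero]

-- main correspondence: A's structural loop totals exactly B's run count
lemma aLoop_eq_bLoop : ∀ (n : ℕ) (xs : List String), xs.length ≤ n →
    ∀ (v : String) (tot : Int), aLoop v xs 0 tot = tot + bLoop (v :: xs) := by
  intro n
  induction n with
  | zero =>
    intro xs h v tot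
    have : xs = [] := List.eq_nil_of_length_eq_zero (by omega)
    subst this
    simp [aLoop, bLoop, bRun]
  | succ n ih =>
    intro xs h v tot
    have h0 : ((0 : ℕ) : Int) = 0 := rfl
    have hrun := aLoop_run xs v 0 tot
    rw [h0] at hrun
    rw [hrun]
    have hcond : (if 0 < 6 ∧ 6 ≤ 0 + (bRun v xs).1 then (1:Int) else 0)
        = (if 7 ≤ (bRun v xs).1 + 1 then (1:Int) else 0) := by
      by_cases hb : 7 ≤ (bRun v xs).1 + 1
      · rw [if_pos (by omega), if_pos hb]
      · rw [if_neg (by omega), if_neg hb]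
    cases hrest : (bRun v xs).2 with
    | nil =>
      dsimp only
      conv_rhs => rw [bLoop]
      simp only [hrest, bLoop]
      rw [hcond]; ring
    | cons y ys =>
      have hlen : ys.length ≤ n := by
        have hl := bRun_rest_le v xs
        rw [hrest] at hl
        simp at hl; omega
      dsimp only
      rw [ih ys hlen y]
      conv_rhs => rw [bLoop]
      simp only [hrest]
      rw [hcond]; ring

-- ===== VERDICT (by name: the statement is the Claim_ definition above) =====
theorem streakFinder_spec : Claim_equal_streakFinder := by
  intro xs _
  unfold Spec_streakFinder streakFinder streakFinder_alt
  cases xs with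
  | nil => simp [PySem.List.pyRange_one_eq_nil, bLoop]
  | cons x rest =>
    have hlen : (0 : Int) < ((x :: rest).length : Int) := by
      have h : 0 < (x :: rest).length := Nat.succ_pos _
      exact_mod_cast h
    rw [PySem.List.pyRange_one_cons hlen]
    simp only [List.foldl_cons]
    have hstep : aStep (x :: rest) (0, 0) 0 = (0, 0) := by
      simp [aStep]
    rw [hstep]
    have h01 : ((0 : Int) + 1) = ((1 : ℕ) : Int) := by norm_num
    rw [h01, bridge rest.length (x :: rest) 1 (0,0) (by simp [Nat.add_comm]) le_rfl]
    have hget : (PySem.List.pyGet? (x :: rest) (((1:ℕ) : Int) - 1)).getD "" = x := by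
      norm_num [PySem.List.pyGet?_zero_cons]
    rw [hget]
    simp only [List.drop_one, List.tail_cons]
    simpa using aLoop_eq_bLoop rest.length rest le_rfl x 0
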